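-- pv_equiv track=rewrite | github.com/Bedeux/2048_IA | classes/WorstTileGenerator.py | reward_tiles_ready_to_converge
-- ===== SOURCE A (Python) =====
-- def reward_tiles_ready_to_converge(grid):
--     """Return the number of pairs that can merge"""
--     score = 0
--
--     for i in range(len(grid)):
--         for j in range(len(grid[i])):
--             value = grid[i][j]
--             if value != 0:
--                 # adjacents
--                 if j > 0 and grid[i][j - 1] == value:
--                     score -= 1
--                 if i > 0 and grid[i - 1][j] == value:
--                     score -= 1
--
--                 # with zeros between (left-right)
--                 left = j - 1
--                 while left >= 0 and grid[i][left] == 0: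
--                     left -= 1
--                 if left >= 0 and grid[i][left] == value:
--                     score -= 1
--
--                 # with zeros between (up-down)
--                 up = i - 1
--                 while up >= 0 and grid[up][j] == 0:
--                     up -= 1
--                 if up >= 0 and grid[up][j] == value:
--                     score -= 1
--     return score
-- ===== SOURCE B (Python) =====
-- def reward_tiles_ready_to_converge(grid):
--     """Return the number of pairs that can merge (one pass per row and per column)."""
--     def line_score(line):
--         s = 0
--         prev = None     # value of the immediately preceding cell
--         lastnz = None   # nearest nonzero value seen so far
--         for v in line:
--             if v != 0:
--                 if prev == v:
--                     s -= 1
--                 if lastnz == v: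
--                     s -= 1
--                 lastnz = v
--             prev = v
--         return s
--     width = max(map(len, grid), default=0)
--     cols = ([row[j] if j < len(row) else 0 for row in grid] for j in range(width))
--     return sum(line_score(r) for r in grid) + sum(line_score(c) for c in cols)
-- ===== Notes on version B (the rewrite author's own statement) =====
-- stated objective: alternative
-- what changed: Instead of, for every nonzero cell, rescanning leftwards and upwards over intervening zeros (worst-case O(n*m*(n+m))), B makes one left-to-right pass over each row and each column tracking the previous value and the last nonzero value, so each cell is touched O(1) times; the asymptotic gain shows only on zero-dense grids, so no speed is claimed.
import Mathlib
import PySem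

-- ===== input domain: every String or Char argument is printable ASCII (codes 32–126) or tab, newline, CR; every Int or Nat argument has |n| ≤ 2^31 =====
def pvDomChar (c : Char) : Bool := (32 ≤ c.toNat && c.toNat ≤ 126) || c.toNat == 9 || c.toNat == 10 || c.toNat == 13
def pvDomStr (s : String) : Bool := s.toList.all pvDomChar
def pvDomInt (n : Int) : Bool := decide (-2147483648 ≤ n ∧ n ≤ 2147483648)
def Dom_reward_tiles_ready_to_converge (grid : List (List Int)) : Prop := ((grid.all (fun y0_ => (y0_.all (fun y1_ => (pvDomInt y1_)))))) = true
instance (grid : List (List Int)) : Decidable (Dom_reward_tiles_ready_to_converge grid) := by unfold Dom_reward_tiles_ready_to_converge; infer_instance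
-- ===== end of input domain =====

-- B replaces A's per-cell backward rescans over zeros with one forward pass per row
-- and per column tracking the previous value and the last nonzero value.

-- ===== PORT A =====
-- grid[i][j] (indices here are always nonnegative and, under Pre_, in range)
def pvA_get (g : List (List Int)) (i j : Nat) : Int := (g.getD i []).getD j 0

-- the 'while left >= 0 and f(left) == 0: left -= 1' scan followed by the equality check;
-- argument k stands for left + 1
def pvA_scan (f : Nat → Int) (v : Int) : Nat → Int
  | 0 => 0
  | k+1 => if f k = 0 then pvA_scan f v k else if f k = v then -1 else 0

-- the four score updates A performs for cell (i, j), in A's order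
def pvA_cell (g : List (List Int)) (i j : Nat) : Int :=
  let v := pvA_get g i j
  if v ≠ 0 then
    (if 0 < j ∧ pvA_get g i (j-1) = v then -1 else 0)
    + (if 0 < i ∧ pvA_get g (i-1) j = v then -1 else 0)
    + pvA_scan (fun k => pvA_get g i k) v j
    + pvA_scan (fun k => pvA_get g k j) v i
  else 0

def reward_tiles_ready_to_converge (grid : List (List Int)) : Int :=
  (List.range grid.length).foldl (fun s i =>
    (List.range (grid.getD i []).length).foldl (fun s j => s + pvA_cell grid i j) s) 0

-- ===== PORT B =====
-- state ((prev, lastnz), s) of B's line_score loop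
def pvB_step (st : (Option Int × Option Int) × Int) (v : Int) : (Option Int × Option Int) × Int :=
  if v ≠ 0 then
    ((some v, some v),
      st.2 + (if st.1.1 = some v then -1 else 0) + (if st.1.2 = some v then -1 else 0))
  else ((some v, st.1.2), st.2)

def pvB_line (l : List Int) : Int := (l.foldl pvB_step ((none, none), 0)).2

-- the columns, padded with 0 to the longest row (row[j] if j < len(row) else 0)
def pvB_cols (g : List (List Int)) : List (List Int) :=
  (List.range (g.foldl (fun m r => max m r.length) 0)).map
    (fun j => g.map (fun row => row.getD j 0))

def reward_tiles_ready_to_converge_alt (grid : List (List Int)) : Int :=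
  (grid.map pvB_line).sum + ((pvB_cols grid).map pvB_line).sum

-- ===== PRECONDITION & SPEC =====
-- A raises IndexError exactly when, above some nonzero cell (i, j), its upward lookup over
-- zeros runs into a row shorter than j+1; pvRaiseCond_ is that condition on the input shape.
def pvRaiseCond (grid : List (List Int)) : Prop :=
  ∃ i < grid.length, ∃ j < (grid.getD i []).length,
    (grid.getD i []).getD j 0 ≠ 0 ∧
    ∃ u < i, (grid.getD u []).length ≤ j ∧
      ∀ t < i, u < t → (j < (grid.getD t []).length ∧ (grid.getD t []).getD j 0 = 0)
-- Pre_ excludes exactly the grids on which A raises IndexError (ragged grids whose upward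
-- neighbour lookup runs past a shorter row); everywhere A returns, B matches it.
def Pre_reward_tiles_ready_to_converge (grid : List (List Int)) : Prop :=
  ¬ pvRaiseCond grid
instance (grid : List (List Int)) : Decidable (Pre_reward_tiles_ready_to_converge grid) := by
  unfold Pre_reward_tiles_ready_to_converge pvRaiseCond; infer_instance
def pvWitness_reward_tiles_ready_to_converge : List (List Int) := [[2, 0], [2, 2]]
def Spec_reward_tiles_ready_to_converge (grid : List (List Int)) (out : Int) : Prop := out = reward_tiles_ready_to_converge_alt grid
instance (grid : List (List Int)) (out : Int) : Decidable (Spec_reward_tiles_ready_to_converge grid out) := by unfold Spec_reward_tiles_ready_to_converge; infer_instance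

-- ===== CLAIM (what is proved, stated in full; the proofs are below) =====
def Claim_equal_reward_tiles_ready_to_converge : Prop := ∀ (grid : List (List Int)), Dom_reward_tiles_ready_to_converge grid → Pre_reward_tiles_ready_to_converge grid → Spec_reward_tiles_ready_to_converge grid (reward_tiles_ready_to_converge grid)

-- ===== LEMMAS AND PROOFS =====

-- last nonzero value of a list
def lastNZ (l : List Int) : Option Int := l.foldl (fun a v => if v ≠ 0 then some v else a) none

-- row-only part of A's cell score
def cellR (l : List Int) (j : Nat) : Int :=
  let v := l.getD j 0
  if v ≠ 0 then
    (if 0 < j ∧ l.getD (j-1) 0 = v then -1 else 0) + pvA_scan (fun k => l.getD k 0) v j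
  else 0

-- column-only part of A's cell score
def cellC (g : List (List Int)) (i j : Nat) : Int :=
  let v := pvA_get g i j
  if v ≠ 0 then
    (if 0 < i ∧ pvA_get g (i-1) j = v then -1 else 0) + pvA_scan (fun k => pvA_get g k j) v i
  else 0

def colList (g : List (List Int)) (j : Nat) : List Int := g.map (fun r => r.getD j 0)

lemma foldl_add_range (f : Nat → Int) (init : Int) (n : Nat) :
    (List.range n).foldl (fun s j => s + f j) init = init + ∑ j ∈ Finset.range n, f j := by
  induction n with
  | zero => simp
  | succ n ih =>
    rw [List.range_succ, List.foldl_append, ih, Finset.sum_range_succ]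
    simp [add_assoc]

lemma A_eq_sum (g : List (List Int)) :
    reward_tiles_ready_to_converge g =
      ∑ i ∈ Finset.range g.length, ∑ j ∈ Finset.range (g.getD i []).length, pvA_cell g i j := by
  unfold reward_tiles_ready_to_converge
  simp only [foldl_add_range]
  simp

lemma cell_split (g : List (List Int)) (i j : Nat) :
    pvA_cell g i j = cellR (g.getD i []) j + cellC g i j := by
  simp only [pvA_cell, cellR, cellC, pvA_get]
  by_cases h : (g.getD i []).getD j 0 ≠ 0
  · simp only [if_pos h]; ring
  · simp only [if_neg h]; ring

lemma scan_congr (f f' : Nat → Int) (v : Int) (n : Nat) (h : ∀ k < n, f k = f' k) :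
    pvA_scan f v n = pvA_scan f' v n := by
  induction n with
  | zero => rfl
  | succ k ih =>
    simp only [pvA_scan]
    rw [h k (Nat.lt_succ_self k), ih (fun m hm => h m (Nat.lt_succ_of_lt hm))]

lemma getD_append_lt (l l' : List Int) (k : Nat) (hk : k < l.length) :
    (l ++ l').getD k 0 = l.getD k 0 := by
  simp [List.getD_eq_getElem?_getD, List.getElem?_append_left hk]

lemma getD_append_self (l : List Int) (a : Int) :
    (l ++ [a]).getD l.length 0 = a := by
  simp [List.getD_eq_getElem?_getD]

lemma lastNZ_append (l : List Int) (a : Int) :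
    lastNZ (l ++ [a]) = if a ≠ 0 then some a else lastNZ l := by
  simp [lastNZ, List.foldl_append]

lemma scan_eq (l : List Int) (v : Int) :
    pvA_scan (fun k => l.getD k 0) v l.length = if lastNZ l = some v then -1 else 0 := by
  induction l using List.reverseRecOn with
  | nil => simp [pvA_scan, lastNZ]
  | append_singleton l a ih =>
    have hlen : (l ++ [a]).length = l.length + 1 := by simp
    rw [hlen]
    simp only [pvA_scan, getD_append_self]
    rw [lastNZ_append]
    by_cases ha : a = 0
    · rw [if_pos ha,
        scan_congr _ (fun k => l.getD k 0) v l.length (fun k hk => getD_append_lt l [a] k hk), ih]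
      simp [ha]
    · simp [ha]

lemma cellR_prefix (l : List Int) (a : Int) (j : Nat) (hj : j < l.length) :
    cellR (l ++ [a]) j = cellR l j := by
  simp only [cellR]
  rw [getD_append_lt l [a] j hj,
    scan_congr _ (fun k => l.getD k 0) _ j (fun k hk => getD_append_lt l [a] k (hk.trans hj)),
    show (l ++ [a]).getD (j - 1) 0 = l.getD (j - 1) 0 from
      getD_append_lt l [a] (j - 1) (lt_of_le_of_lt (Nat.sub_le j 1) hj)]

lemma pvB_state (l : List Int) :
    l.foldl pvB_step ((none, none), 0) = ((l.getLast?, lastNZ l), pvB_line l) := by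
  induction l using List.reverseRecOn with
  | nil => simp [pvB_line, lastNZ]
  | append_singleton l a ih =>
    have h2 : pvB_line (l ++ [a]) = (pvB_step (l.foldl pvB_step ((none, none), 0)) a).2 := by
      simp [pvB_line, List.foldl_append]
    rw [List.foldl_append, List.foldl_cons, List.foldl_nil, ih, h2, ih, lastNZ_append,
      List.getLast?_concat]
    by_cases ha : a = 0 <;> simp [pvB_step, ha]

lemma pvB_line_append (l : List Int) (a : Int) :
    pvB_line (l ++ [a]) = pvB_line l +
      (if a ≠ 0 then (if l.getLast? = some a then -1 else 0)
        + (if lastNZ l = some a then -1 else 0) else 0) := by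
  have h : pvB_line (l ++ [a]) = (pvB_step (l.foldl pvB_step ((none, none), 0)) a).2 := by
    simp [pvB_line, List.foldl_append]
  rw [h, pvB_state]
  by_cases ha : a = 0 <;> simp [pvB_step, ha, add_assoc]

lemma getLast?_iff (l : List Int) (a : Int) :
    (0 < l.length ∧ l.getD (l.length - 1) 0 = a) ↔ l.getLast? = some a := by
  cases l with
  | nil => simp
  | cons b bs =>
    have hlt : (b :: bs).length - 1 < (b :: bs).length := by simp
    rw [List.getLast?_eq_getElem?, List.getD_eq_getElem?_getD, List.getElem?_eq_getElem hlt]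
    simp

lemma cellR_last (l : List Int) (a : Int) :
    cellR (l ++ [a]) l.length =
      (if a ≠ 0 then (if l.getLast? = some a then -1 else 0)
        + (if lastNZ l = some a then -1 else 0) else 0) := by
  simp only [cellR, getD_append_self]
  by_cases ha : a = 0
  · simp [ha]
  · rw [if_pos ha, if_pos ha]
    congr 1
    · by_cases hl : 0 < l.length
      · rw [show (l ++ [a]).getD (l.length - 1) 0 = l.getD (l.length - 1) 0 from
          getD_append_lt l [a] _ (by omega)]
        by_cases hg : l.getLast? = some a
        · rw [if_pos ((getLast?_iff l a).mpr hg), if_pos hg]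
        · rw [if_neg (fun hc => hg ((getLast?_iff l a).mp hc)), if_neg hg]
      · have : l = [] := by cases l <;> simp_all
        subst this; simp
    · rw [scan_congr _ (fun k => l.getD k 0) _ l.length
        (fun k hk => getD_append_lt l [a] k hk), scan_eq]

lemma row_eq (l : List Int) :
    ∑ j ∈ Finset.range l.length, cellR l j = pvB_line l := by
  induction l using List.reverseRecOn with
  | nil => simp [pvB_line]
  | append_singleton l a ih =>
    have hlen : (l ++ [a]).length = l.length + 1 := by simp
    rw [hlen, Finset.sum_range_succ,
      Finset.sum_congr rfl (fun j hj => cellR_prefix l a j (Finset.mem_range.mp hj)),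
      ih, cellR_last, pvB_line_append]

lemma sum_map_getD (g : List (List Int)) (f : List Int → Int) :
    (g.map f).sum = ∑ i ∈ Finset.range g.length, f (g.getD i []) := by
  induction g with
  | nil => simp
  | cons r rs ih => simp [Finset.sum_range_succ', ih, add_comm]

lemma sum_map_range (f : Nat → Int) (n : Nat) :
    ((List.range n).map f).sum = ∑ j ∈ Finset.range n, f j := by
  induction n with
  | zero => simp
  | succ n ih => rw [List.range_succ, List.map_append, List.sum_append, ih,
      Finset.sum_range_succ]; simp

lemma colList_getD (g : List (List Int)) (i j : Nat) (hi : i < g.length) :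
    (colList g j).getD i 0 = pvA_get g i j := by
  simp [colList, pvA_get, List.getD_eq_getElem?_getD, hi]

lemma cellC_eq (g : List (List Int)) (i j : Nat) (hi : i < g.length) :
    cellC g i j = cellR (colList g j) i := by
  simp only [cellC, cellR]
  rw [colList_getD g i j hi,
    scan_congr (fun k => pvA_get g k j) (fun k => (colList g j).getD k 0) _ i
      (fun k hk => (colList_getD g k j (hk.trans hi)).symm)]
  congr 1
  by_cases h0 : 0 < i
  · rw [colList_getD g (i - 1) j (by omega)]
  · simp [h0]

lemma foldl_max_init_le (g : List (List Int)) (m : Nat) :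
    m ≤ g.foldl (fun m r => max m r.length) m := by
  induction g generalizing m with
  | nil => simp
  | cons b bs ih => exact le_trans (Nat.le_max_left _ _) (ih _)

lemma len_le_foldl_max (g : List (List Int)) (r : List Int) (hr : r ∈ g) (m : Nat) :
    r.length ≤ g.foldl (fun m r => max m r.length) m := by
  induction g generalizing m with
  | nil => simp at hr
  | cons b bs ih =>
    rcases List.mem_cons.mp hr with h | h
    · subst h; exact le_trans (Nat.le_max_right _ _) (foldl_max_init_le _ _)
    · exact ih h _

-- ===== VERDICT (by name: the statement is the Claim_ definition above) =====
theorem reward_tiles_ready_to_converge_spec : Claim_equal_reward_tiles_ready_to_converge := by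
  intro g _ _
  unfold Spec_reward_tiles_ready_to_converge reward_tiles_ready_to_converge_alt
  have hW : ∀ i < g.length, (g.getD i []).length ≤ g.foldl (fun m r => max m r.length) 0 := by
    intro i hi
    rw [List.getD_eq_getElem _ _ hi]
    exact len_le_foldl_max g _ (List.getElem_mem hi) 0
  rw [A_eq_sum]
  have step1 : (∑ i ∈ Finset.range g.length, ∑ j ∈ Finset.range (g.getD i []).length,
      pvA_cell g i j)
      = ∑ i ∈ Finset.range g.length, (pvB_line (g.getD i [])
          + ∑ j ∈ Finset.range (g.foldl (fun m r => max m r.length) 0), cellC g i j) := by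
    refine Finset.sum_congr rfl (fun i hi => ?_)
    have hi' := Finset.mem_range.mp hi
    rw [Finset.sum_congr rfl (fun j _ => cell_split g i j), Finset.sum_add_distrib, row_eq]
    congr 1
    refine Finset.sum_subset (fun x hx => Finset.mem_range.mpr (lt_of_lt_of_le (Finset.mem_range.mp hx) (hW i hi'))) (fun j _ hj => ?_)
    have hlen : (g.getD i []).length ≤ j := by
      simpa using Finset.mem_range.not.mp hj
    have hv : pvA_get g i j = 0 := List.getD_eq_default _ _ hlen
    simp [cellC, hv]
  rw [step1, Finset.sum_add_distrib, ← sum_map_getD, Finset.sum_comm]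
  congr 1
  rw [show pvB_cols g = (List.range (g.foldl (fun m r => max m r.length) 0)).map
        (fun j => colList g j) from rfl,
    List.map_map, sum_map_range]
  refine Finset.sum_congr rfl (fun j _ => ?_)
  have hlen : (colList g j).length = g.length := by simp [colList]
  simp only [Function.comp_apply]
  rw [← row_eq, hlen]
  exact Finset.sum_congr rfl (fun i hi => cellC_eq g i j (Finset.mem_range.mp hi))
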